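-- pv_equiv track=rewrite | github.com/CesarCastilloM/SISRIAPP | backend/ml_models/crop_analyzer.py | _generate_stress_recommendations
-- ===== SOURCE A (Python) =====
-- def _generate_stress_recommendations(stress_factors):
--     """Generate specific recommendations based on stress factors"""
--     recommendations = []
--
--     for factor in stress_factors:
--         if factor['factor'] == 'High Temperature':
--             recommendations.extend([
--                 'Increase irrigation frequency',
--                 'Consider shade protection',
--                 'Monitor for signs of heat stress'
--             ])
--         elif factor['factor'] == 'Low Soil Moisture':
--             recommendations.extend([
--                 'Immediate irrigation required',
--                 'Apply mulch to reduce evaporation',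
--                 'Check irrigation system efficiency'
--             ])
--
--     return list(set(recommendations))  # Remove duplicates
-- ===== SOURCE B (Python) =====
-- _STRESS_RECOMMENDATIONS = {
--     'High Temperature': [
--         'Increase irrigation frequency',
--         'Consider shade protection',
--         'Monitor for signs of heat stress',
--     ],
--     'Low Soil Moisture': [
--         'Immediate irrigation required',
--         'Apply mulch to reduce evaporation',
--         'Check irrigation system efficiency',
--     ],
-- }
--
--
-- def _generate_stress_recommendations(stress_factors):
--     # Collect the distinct recognized factor names (first-occurrence order),
--     # then expand each name's fixed recommendation block once.
--     seen = []
--     for factor in stress_factors: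
--         name = factor['factor']
--         if name in _STRESS_RECOMMENDATIONS and name not in seen:
--             seen.append(name)
--     return [rec for name in seen for rec in _STRESS_RECOMMENDATIONS[name]]
-- ===== Notes on version B (the rewrite author's own statement) =====
-- stated objective: simpler
-- what changed: Instead of extending a recommendations list per matching factor and deduplicating the whole list with set() at the end, B dedups the (at most two) recognized factor names in one pass and expands each name's fixed recommendation block exactly once from a lookup table.
import Mathlib
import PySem

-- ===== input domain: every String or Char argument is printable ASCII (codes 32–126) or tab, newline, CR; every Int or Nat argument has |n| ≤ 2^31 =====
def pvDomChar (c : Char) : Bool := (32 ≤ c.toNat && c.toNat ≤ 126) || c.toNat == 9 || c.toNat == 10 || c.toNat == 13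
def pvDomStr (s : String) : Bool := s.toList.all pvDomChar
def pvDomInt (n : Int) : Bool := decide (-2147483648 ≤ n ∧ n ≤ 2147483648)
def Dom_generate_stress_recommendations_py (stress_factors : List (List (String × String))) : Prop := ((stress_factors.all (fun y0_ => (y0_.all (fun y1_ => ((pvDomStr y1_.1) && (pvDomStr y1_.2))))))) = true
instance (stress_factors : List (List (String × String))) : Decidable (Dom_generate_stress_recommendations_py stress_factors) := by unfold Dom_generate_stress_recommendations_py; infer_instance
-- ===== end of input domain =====

-- B replaces A's per-factor list extension + final set() dedup by deduplicating the
-- recognized factor names first and expanding each name's fixed block once (simpler: O(1) extra state).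

def pvHiRecs : List String :=
  ["Increase irrigation frequency", "Consider shade protection", "Monitor for signs of heat stress"]
def pvLoRecs : List String :=
  ["Immediate irrigation required", "Apply mulch to reduce evaporation", "Check irrigation system efficiency"]

-- ===== PORT A =====
-- loop body: branch on factor['factor'] (none = KeyError, excluded by Pre_; the port leaves recs unchanged there)
def pvStepA (recs : List String) (factor : List (String × String)) : List String :=
  match (PySem.Dict.mk factor).get? "factor" with
  | none => recs
  | some v =>
    if v = "High Temperature" then recs ++ pvHiRecs
    else if v = "Low Soil Moisture" then recs ++ pvLoRecs
    else recs

def generate_stress_recommendations_py (stress_factors : List (List (String × String))) : List String :=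
  PySem.Set.ofList (stress_factors.foldl pvStepA [])

-- ===== PORT B =====
def pvStressTable : PySem.Dict String (List String) :=
  PySem.Dict.mk [("High Temperature", pvHiRecs), ("Low Soil Moisture", pvLoRecs)]

-- _STRESS_RECOMMENDATIONS[name]; names taken from seen are always keys, so getD [] is never the default
def pvBlock (name : String) : List String := (PySem.Dict.get? pvStressTable name).getD []

-- loop body: name = factor['factor'] (none = KeyError, excluded by Pre_); record new recognized names
def pvStepB (seen : List String) (factor : List (String × String)) : List String :=
  match (PySem.Dict.mk factor).get? "factor" with
  | none => seen
  | some name =>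
    if PySem.Dict.contains pvStressTable name && !(seen.contains name) then seen ++ [name] else seen

def generate_stress_recommendations_py_alt (stress_factors : List (List (String × String))) : List String :=
  (stress_factors.foldl pvStepB []).flatMap pvBlock

-- ===== PRECONDITION & SPEC =====
-- Pre_ excludes exactly the inputs where Python raises KeyError (a factor dict without the key 'factor'); both A and B raise there.
def Pre_generate_stress_recommendations_py (stress_factors : List (List (String × String))) : Prop :=
  ∀ f ∈ stress_factors, ((PySem.Dict.mk f).get? "factor").isSome = true
instance (stress_factors : List (List (String × String))) : Decidable (Pre_generate_stress_recommendations_py stress_factors) := by unfold Pre_generate_stress_recommendations_py; infer_instance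

def pvWitness_generate_stress_recommendations_py : (List (List (String × String))) :=
  [[("factor", "High Temperature")], [("factor", "Low Soil Moisture")]]

def Spec_generate_stress_recommendations_py (stress_factors : List (List (String × String))) (out : List String) : Prop := out = generate_stress_recommendations_py_alt stress_factors
instance (stress_factors : List (List (String × String))) (out : List String) : Decidable (Spec_generate_stress_recommendations_py stress_factors out) := by unfold Spec_generate_stress_recommendations_py; infer_instance

-- ===== CLAIM (what is proved, stated in full; the proofs are below) =====
def Claim_equal_generate_stress_recommendations_py : Prop := ∀ (stress_factors : List (List (String × String))), Dom_generate_stress_recommendations_py stress_factors → Pre_generate_stress_recommendations_py stress_factors → Spec_generate_stress_recommendations_py stress_factors (generate_stress_recommendations_py stress_factors)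

-- ===== LEMMAS AND PROOFS =====

theorem pv_block_hi : pvBlock "High Temperature" = pvHiRecs := by decide
theorem pv_block_lo : pvBlock "Low Soil Moisture" = pvLoRecs := by decide

theorem pv_update_of_subset (s : PySem.Set String) (ys : List String)
    (h : ∀ x ∈ ys, x ∈ s) : PySem.Set.update s ys = s := by
  rw [PySem.Set.update_eq_append_filter]
  have hnil : (PySem.Set.ofList ys).filter (fun y => !(PySem.Set.contains s y)) = [] := by
    apply List.filter_eq_nil_iff.mpr
    intro y hy
    have hys : y ∈ ys := (PySem.Set.mem_ofList _ _).mp hy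
    simp
    exact h y hys
  rw [hnil, List.append_nil]

-- core invariant: A's accumulated recommendations, deduplicated, are exactly the blocks of B's seen names
theorem pv_loop (sf : List (List (String × String))) :
    ∀ recs seen,
      PySem.Set.ofList recs = seen.flatMap pvBlock →
      (∀ n ∈ seen, n = "High Temperature" ∨ n = "Low Soil Moisture") →
      PySem.Set.ofList (sf.foldl pvStepA recs) = (sf.foldl pvStepB seen).flatMap pvBlock := by
  induction sf with
  | nil => intro recs seen H1 _; simpa using H1
  | cons f rest ih =>
    intro recs seen H1 H2
    simp only [List.foldl_cons]
    have hdisj : ∀ x ∈ pvHiRecs, x ∉ pvLoRecs := by decide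
    rcases hg : (PySem.Dict.mk f).get? "factor" with _ | v
    · simp only [pvStepA, pvStepB, hg]
      exact ih recs seen H1 H2
    · by_cases hv1 : v = "High Temperature"
      · subst hv1
        have hA : pvStepA recs f = recs ++ pvHiRecs := by simp [pvStepA, hg]
        have hct : PySem.Dict.contains pvStressTable "High Temperature" = true := by decide
        by_cases hm : "High Temperature" ∈ seen
        · have hB : pvStepB seen f = seen := by simp [pvStepB, hg, hm]
          rw [hA, hB]
          apply ih _ _ _ H2
          rw [PySem.Set.ofList_append, pv_update_of_subset, H1]
          intro x hx
          rw [H1]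
          exact List.mem_flatMap.mpr ⟨"High Temperature", hm, by rwa [pv_block_hi]⟩
        · have hB : pvStepB seen f = seen ++ ["High Temperature"] := by
            simp [pvStepB, hg, hm, hct]
          have hfresh : ∀ x ∈ pvHiRecs, x ∉ PySem.Set.ofList recs := by
            intro x hx hmem
            rw [H1] at hmem
            rcases List.mem_flatMap.mp hmem with ⟨n, hn, hxn⟩
            rcases H2 n hn with rfl | rfl
            · exact hm hn
            · rw [pv_block_lo] at hxn
              exact hdisj x hx hxn
          rw [hA, hB]
          apply ih
          · rw [PySem.Set.ofList_append,
              PySem.Set.update_eq_append_of_disjoint _ _ (by decide) hfresh, H1]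
            simp [List.flatMap_append, pv_block_hi]
          · intro n hn
            rcases List.mem_append.mp hn with h | h
            · exact H2 n h
            · left; simpa using h
      · by_cases hv2 : v = "Low Soil Moisture"
        · subst hv2
          have hA : pvStepA recs f = recs ++ pvLoRecs := by simp [pvStepA, hg]
          have hct : PySem.Dict.contains pvStressTable "Low Soil Moisture" = true := by decide
          by_cases hm : "Low Soil Moisture" ∈ seen
          · have hB : pvStepB seen f = seen := by simp [pvStepB, hg, hm]
            rw [hA, hB]
            apply ih _ _ _ H2
            rw [PySem.Set.ofList_append, pv_update_of_subset, H1]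
            intro x hx
            rw [H1]
            exact List.mem_flatMap.mpr ⟨"Low Soil Moisture", hm, by rwa [pv_block_lo]⟩
          · have hB : pvStepB seen f = seen ++ ["Low Soil Moisture"] := by
              simp [pvStepB, hg, hm, hct]
            have hfresh : ∀ x ∈ pvLoRecs, x ∉ PySem.Set.ofList recs := by
              intro x hx hmem
              rw [H1] at hmem
              rcases List.mem_flatMap.mp hmem with ⟨n, hn, hxn⟩
              rcases H2 n hn with rfl | rfl
              · rw [pv_block_hi] at hxn
                exact hdisj x hxn hx
              · exact hm hn
            rw [hA, hB]
            apply ih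
            · rw [PySem.Set.ofList_append,
                PySem.Set.update_eq_append_of_disjoint _ _ (by decide) hfresh, H1]
              simp [List.flatMap_append, pv_block_lo]
            · intro n hn
              rcases List.mem_append.mp hn with h | h
              · exact H2 n h
              · right; simpa using h
        · have hA : pvStepA recs f = recs := by simp [pvStepA, hg, hv1, hv2]
          have hB : pvStepB seen f = seen := by
            have hc : PySem.Dict.contains pvStressTable v = false := by
              rw [PySem.Dict.contains_eq_decide_mem_keys]
              simp [pvStressTable, PySem.Dict.keys, hv1, hv2]
            simp [pvStepB, hg, hc]
          rw [hA, hB]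
          exact ih recs seen H1 H2

-- ===== VERDICT (by name: the statement is the Claim_ definition above) =====
theorem generate_stress_recommendations_py_spec : Claim_equal_generate_stress_recommendations_py := by
  intro sf _ _
  unfold Spec_generate_stress_recommendations_py generate_stress_recommendations_py generate_stress_recommendations_py_alt
  exact pv_loop sf [] [] (by simp) (by simp)
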